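-- pv_equiv track=rewrite | github.com/DumbledoreD/algo-spec | assignments/c4w2/bwmatching.py | get_tally
-- ===== SOURCE A (Python) =====
-- ALPHABET = ["A", "C", "G", "T"]
--
-- def get_tally(bwt):
--     tally = {char: [1 if bwt[0] == char else 0] for char in ALPHABET}
--
--     for i in range(1, len(bwt)):
--         for char in ALPHABET:
--             if bwt[i] == char:
--                 tally[char].append(tally[char][-1] + 1)
--             else:
--                 tally[char].append(tally[char][-1])
--
--     return tally
-- ===== SOURCE B (Python) =====
-- ALPHABET = ["A", "C", "G", "T"]
--
--
-- def get_tally(bwt):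
--     n = len(bwt)
--     positions = {char: [] for char in ALPHABET}
--     for i, c in enumerate(bwt):
--         if c in positions:
--             positions[c].append(i)
--     tally = {}
--     for char in ALPHABET:
--         col = []
--         count = 0
--         prev = 0
--         for p in positions[char]:
--             col.extend([count] * (p - prev))
--             count += 1
--             prev = p
--         col.extend([count] * (n - prev))
--         tally[char] = col
--     return tally
-- ===== Notes on version B (the rewrite author's own statement) =====
-- stated objective: faster
-- what changed: A counts per position, branching over all four letters at each index and appending element-by-element to four running lists; B collects each letter's occurrence positions in one enumerate pass and then reconstructs each count column by run-length expansion ([count]*(gap) bulk extends) between consecutive occurrence positions, so the per-position four-way branch-and-append work disappears.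
import Mathlib
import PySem

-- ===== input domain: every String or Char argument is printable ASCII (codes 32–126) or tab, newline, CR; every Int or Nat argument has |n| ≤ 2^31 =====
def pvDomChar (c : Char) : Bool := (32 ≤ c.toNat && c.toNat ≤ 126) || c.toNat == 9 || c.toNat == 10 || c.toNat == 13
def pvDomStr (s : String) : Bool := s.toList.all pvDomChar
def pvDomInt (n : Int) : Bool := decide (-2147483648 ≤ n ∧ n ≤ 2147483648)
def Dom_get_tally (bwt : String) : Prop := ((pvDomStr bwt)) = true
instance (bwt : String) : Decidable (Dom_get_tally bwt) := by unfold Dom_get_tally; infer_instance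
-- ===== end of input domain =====

-- B replaces A's per-position counting pass (branching over all four letters at every index) by a
-- different algorithm: one enumerate pass collecting each letter's occurrence positions, then each
-- count column is rebuilt by run-length expansion between consecutive positions; objective: faster (constant-factor, measured).
-- Python's 1-character strings (ALPHABET entries and bwt[i]) are modeled as Lean Char, keyed in the
-- dicts as the corresponding 1-character String.

def ALPHABET : List Char := ['A', 'C', 'G', 'T']

-- ===== PORT A =====
-- tally = {char: [1 if bwt[0] == char else 0] for char in ALPHABET}
-- for i in range(1, len(bwt)): for char in ALPHABET:
--     tally[char].append(tally[char][-1] + 1 if bwt[i] == char else tally[char][-1])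
def get_tally (bwt : String) : List (String × List Int) :=
  let tally : PySem.Dict String (List Int) :=
    ALPHABET.foldl (fun d char =>
      d.insert (String.ofList [char])
        [if PySem.Str.pyGet? bwt 0 = some char then (1 : Int) else 0]) PySem.Dict.empty
  let tally := (PySem.List.pyRange 1 (PySem.Str.len bwt) 1).foldl (fun d i =>
    ALPHABET.foldl (fun d char =>
      let l := d.getD (String.ofList [char]) []
      if PySem.Str.pyGet? bwt i = some char then
        d.insert (String.ofList [char]) (l ++ [PySem.List.pyGetD l (-1) 0 + 1])
      else
        d.insert (String.ofList [char]) (l ++ [PySem.List.pyGetD l (-1) 0])) d) tally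
  tally.items

-- ===== PORT B =====
-- n = len(bwt); positions = {char: [] for char in ALPHABET}
-- for i, c in enumerate(bwt):
--     if c in positions: positions[c].append(i)
-- tally = {}
-- for char in ALPHABET:
--     col = []; count = 0; prev = 0
--     for p in positions[char]: col.extend([count] * (p - prev)); count += 1; prev = p
--     col.extend([count] * (n - prev)); tally[char] = col
-- ([x] * k with k ≤ 0 is []: ported exactly by List.replicate (…).toNat)
def get_tally_alt (bwt : String) : List (String × List Int) :=
  let n := PySem.Str.len bwt
  let positions : PySem.Dict String (List Int) :=
    ALPHABET.foldl (fun d char => d.insert (String.ofList [char]) []) PySem.Dict.empty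
  let positions := (PySem.List.enumerate bwt.toList).foldl (fun d (ic : Int × Char) =>
    if d.contains (String.ofList [ic.2]) then
      d.modify (String.ofList [ic.2]) [] (fun l => l ++ [ic.1])
    else d) positions
  (ALPHABET.foldl (fun (t : PySem.Dict String (List Int)) char =>
    let r := (positions.getD (String.ofList [char]) []).foldl
      (fun (acc : List Int × Int × Int) p =>
        (acc.1 ++ List.replicate (p - acc.2.2).toNat acc.2.1, acc.2.1 + 1, p))
      ([], 0, 0)
    t.insert (String.ofList [char]) (r.1 ++ List.replicate (n - r.2.2).toNat r.2.1))
    PySem.Dict.empty).items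

-- ===== PRECONDITION & SPEC =====
-- Pre_ excludes only the empty string, on which A raises IndexError (it evaluates bwt[0]).
def Pre_get_tally (bwt : String) : Prop := bwt ≠ ""
instance (bwt : String) : Decidable (Pre_get_tally bwt) := by unfold Pre_get_tally; infer_instance
def pvWitness_get_tally : String := "GATTACA"

def Spec_get_tally (bwt : String) (out : List (String × List Int)) : Prop := out = get_tally_alt bwt
instance (bwt : String) (out : List (String × List Int)) : Decidable (Spec_get_tally bwt out) := by unfold Spec_get_tally; infer_instance

-- ===== CLAIM (what is proved, stated in full; the proofs are below) =====
def Claim_equal_get_tally : Prop := ∀ (bwt : String), Dom_get_tally bwt → Pre_get_tally bwt → Spec_get_tally bwt (get_tally bwt)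

-- ===== LEMMAS AND PROOFS =====

-- the 0/1 indicator and the running-count column both programs produce
def pvInd (char c : Char) : Int := if c = char then 1 else 0

def pvScan (char : Char) (r : Int) : List Char → List Int
  | [] => []
  | c :: t => (r + pvInd char c) :: pvScan char (r + pvInd char c) t

-- the dict state A's main loop maintains
def pvState (q : List Char) : PySem.Dict String (List Int) :=
  PySem.Dict.mk (ALPHABET.map fun ch => (String.ofList [ch], pvScan ch 0 q))

-- A's per-position step, with the looked-up character made a parameter
def pvStep (c : Char) (d : PySem.Dict String (List Int)) : PySem.Dict String (List Int) :=
  ALPHABET.foldl (fun d char =>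
    let l := d.getD (String.ofList [char]) []
    if some c = some char then
      d.insert (String.ofList [char]) (l ++ [PySem.List.pyGetD l (-1) 0 + 1])
    else
      d.insert (String.ofList [char]) (l ++ [PySem.List.pyGetD l (-1) 0])) d

lemma pvScan_append (char : Char) (r : Int) (l m : List Char) :
    pvScan char r (l ++ m) = pvScan char r l ++ pvScan char (r + (l.countP (· = char) : Int)) m := by
  induction l generalizing r with
  | nil => simp [pvScan]
  | cons c t ih =>
      simp only [List.cons_append, pvScan, ih, List.countP_cons]
      by_cases h : c = char <;> simp [pvInd, h, add_comm, add_assoc]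

lemma pvScan_last (char : Char) (r : Int) (l : List Char) (h : l ≠ []) :
    PySem.List.pyGetD (pvScan char r l) (-1) 0 = r + (l.countP (· = char) : Int) := by
  induction l using List.reverseRecOn with
  | nil => exact absurd rfl h
  | append_singleton m c _ =>
      rw [pvScan_append]
      simp only [pvScan, PySem.List.pyGetD_neg_one_append_singleton,
        List.countP_append, List.countP_cons, List.countP_nil]
      by_cases hc : c = char
      · simp [pvInd, hc]
        ring
      · simp [pvInd, hc]

-- evaluating the four-key dict primitives on a literal state
lemma pvInsA (va vc vg vt w : List Int) :
    (PySem.Dict.mk [("A", va), ("C", vc), ("G", vg), ("T", vt)]).insert "A" w =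
      PySem.Dict.mk [("A", w), ("C", vc), ("G", vg), ("T", vt)] := by
  apply PySem.Dict.ext; simp [PySem.Dict.items_insert]
lemma pvInsC (va vc vg vt w : List Int) :
    (PySem.Dict.mk [("A", va), ("C", vc), ("G", vg), ("T", vt)]).insert "C" w =
      PySem.Dict.mk [("A", va), ("C", w), ("G", vg), ("T", vt)] := by
  apply PySem.Dict.ext; simp [PySem.Dict.items_insert]
lemma pvInsG (va vc vg vt w : List Int) :
    (PySem.Dict.mk [("A", va), ("C", vc), ("G", vg), ("T", vt)]).insert "G" w =
      PySem.Dict.mk [("A", va), ("C", vc), ("G", w), ("T", vt)] := by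
  apply PySem.Dict.ext; simp [PySem.Dict.items_insert]
lemma pvInsT (va vc vg vt w : List Int) :
    (PySem.Dict.mk [("A", va), ("C", vc), ("G", vg), ("T", vt)]).insert "T" w =
      PySem.Dict.mk [("A", va), ("C", vc), ("G", vg), ("T", w)] := by
  apply PySem.Dict.ext; simp [PySem.Dict.items_insert]
lemma pvGetA (va vc vg vt : List Int) :
    (PySem.Dict.mk [("A", va), ("C", vc), ("G", vg), ("T", vt)]).getD "A" [] = va := by
  simp [PySem.Dict.getD_eq_get?_getD, PySem.Dict.get?_mk_cons]
lemma pvGetC (va vc vg vt : List Int) :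
    (PySem.Dict.mk [("A", va), ("C", vc), ("G", vg), ("T", vt)]).getD "C" [] = vc := by
  simp [PySem.Dict.getD_eq_get?_getD, PySem.Dict.get?_mk_cons]
lemma pvGetG (va vc vg vt : List Int) :
    (PySem.Dict.mk [("A", va), ("C", vc), ("G", vg), ("T", vt)]).getD "G" [] = vg := by
  simp [PySem.Dict.getD_eq_get?_getD, PySem.Dict.get?_mk_cons]
lemma pvGetT (va vc vg vt : List Int) :
    (PySem.Dict.mk [("A", va), ("C", vc), ("G", vg), ("T", vt)]).getD "T" [] = vt := by
  simp [PySem.Dict.getD_eq_get?_getD, PySem.Dict.get?_mk_cons]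
lemma pvKeyA : String.ofList ['A'] = "A" := rfl
lemma pvKeyC : String.ofList ['C'] = "C" := rfl
lemma pvKeyG : String.ofList ['G'] = "G" := rfl
lemma pvKeyT : String.ofList ['T'] = "T" := rfl

lemma pvIfInsert (P : Prop) [Decidable P] (d : PySem.Dict String (List Int)) (k : String) (x y : List Int) :
    (if P then d.insert k x else d.insert k y) = d.insert k (if P then x else y) := by
  split_ifs <;> rfl

lemma pvIfVal (P : Prop) [Decidable P] (l : List Int) (x : Int) :
    (if P then l ++ [x + 1] else l ++ [x]) = l ++ [x + (if P then 1 else 0)] := by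
  split_ifs <;> simp

-- A's per-position inner ALPHABET loop, evaluated on a literal 4-key state
lemma pvStepA (c : Char) (la lc lg lt : List Int) :
    pvStep c (PySem.Dict.mk [("A", la), ("C", lc), ("G", lg), ("T", lt)]) =
    PySem.Dict.mk
      [("A", la ++ [PySem.List.pyGetD la (-1) 0 + pvInd 'A' c]),
       ("C", lc ++ [PySem.List.pyGetD lc (-1) 0 + pvInd 'C' c]),
       ("G", lg ++ [PySem.List.pyGetD lg (-1) 0 + pvInd 'G' c]),
       ("T", lt ++ [PySem.List.pyGetD lt (-1) 0 + pvInd 'T' c])] := by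
  unfold pvStep
  simp only [ALPHABET, List.foldl_cons, List.foldl_nil, Option.some.injEq,
    pvKeyA, pvKeyC, pvKeyG, pvKeyT]
  simp only [pvIfInsert]
  simp only [pvGetA, pvGetC, pvGetG, pvGetT, pvInsA, pvInsC, pvInsG, pvInsT]
  simp only [pvIfVal]
  simp [pvInd]

lemma pvScan_snoc (char c0 c : Char) (p : List Char) :
    pvScan char 0 (c0 :: p) ++ [PySem.List.pyGetD (pvScan char 0 (c0 :: p)) (-1) 0 + pvInd char c]
      = pvScan char 0 (c0 :: (p ++ [c])) := by
  rw [pvScan_last char 0 (c0 :: p) (by simp)]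
  have h : c0 :: (p ++ [c]) = (c0 :: p) ++ [c] := by simp
  rw [h, pvScan_append]
  simp [pvScan]

-- A's main loop keeps the state at the four running-count columns
lemma pvLoopA (c0 : Char) (p l : List Char) :
    l.foldl (fun d c => pvStep c d) (pvState (c0 :: p)) = pvState (c0 :: (p ++ l)) := by
  induction l generalizing p with
  | nil => simp
  | cons c t ih =>
      rw [List.foldl_cons]
      have hstep : pvStep c (pvState (c0 :: p)) = pvState (c0 :: (p ++ [c])) := by
        unfold pvState
        simp only [ALPHABET, List.map_cons, List.map_nil,
          pvKeyA, pvKeyC, pvKeyG, pvKeyT]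
        rw [pvStepA]
        simp only [pvScan_snoc]
      rw [hstep, ih]
      simp

-- the dict comprehension / insertion loop over the four fresh keys
lemma pvInit (v : Char → List Int) :
    ALPHABET.foldl (fun d char => d.insert (String.ofList [char]) (v char)) PySem.Dict.empty
      = PySem.Dict.mk [("A", v 'A'), ("C", v 'C'), ("G", v 'G'), ("T", v 'T')] := by
  simp only [ALPHABET, List.foldl_cons, List.foldl_nil, pvKeyA, pvKeyC, pvKeyG, pvKeyT]
  apply PySem.Dict.ext
  simp [PySem.Dict.items_insert, PySem.Dict.contains_insert, PySem.Dict.empty]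

-- ===== B-side lemmas =====

lemma pvKeyEq (x y : Char) : String.ofList [x] = String.ofList [y] ↔ x = y := by
  constructor
  · intro h; have := congrArg String.toList h; simpa using this
  · intro h; rw [h]

-- modify on a literal 4-key dict
lemma pvModA (a c g t : List Int) (f : List Int → List Int) :
    (PySem.Dict.mk [("A", a), ("C", c), ("G", g), ("T", t)]).modify "A" [] f =
      PySem.Dict.mk [("A", f a), ("C", c), ("G", g), ("T", t)] := by
  apply PySem.Dict.ext
  simp [PySem.Dict.modify, PySem.Dict.items_insert, PySem.Dict.getD_eq_get?_getD, PySem.Dict.get?_mk_cons]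
lemma pvModC (a c g t : List Int) (f : List Int → List Int) :
    (PySem.Dict.mk [("A", a), ("C", c), ("G", g), ("T", t)]).modify "C" [] f =
      PySem.Dict.mk [("A", a), ("C", f c), ("G", g), ("T", t)] := by
  apply PySem.Dict.ext
  simp [PySem.Dict.modify, PySem.Dict.items_insert, PySem.Dict.getD_eq_get?_getD, PySem.Dict.get?_mk_cons]
lemma pvModG (a c g t : List Int) (f : List Int → List Int) :
    (PySem.Dict.mk [("A", a), ("C", c), ("G", g), ("T", t)]).modify "G" [] f =
      PySem.Dict.mk [("A", a), ("C", c), ("G", f g), ("T", t)] := by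
  apply PySem.Dict.ext
  simp [PySem.Dict.modify, PySem.Dict.items_insert, PySem.Dict.getD_eq_get?_getD, PySem.Dict.get?_mk_cons]
lemma pvModT (a c g t : List Int) (f : List Int → List Int) :
    (PySem.Dict.mk [("A", a), ("C", c), ("G", g), ("T", t)]).modify "T" [] f =
      PySem.Dict.mk [("A", a), ("C", c), ("G", g), ("T", f t)] := by
  apply PySem.Dict.ext
  simp [PySem.Dict.modify, PySem.Dict.items_insert, PySem.Dict.getD_eq_get?_getD, PySem.Dict.get?_mk_cons]

lemma pvContainsOther (a c g t : List Int) (x : Char)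
    (h1 : x ≠ 'A') (h2 : x ≠ 'C') (h3 : x ≠ 'G') (h4 : x ≠ 'T') :
    (PySem.Dict.mk [("A", a), ("C", c), ("G", g), ("T", t)]).contains (String.ofList [x]) = false := by
  simp only [PySem.Dict.contains_mk, List.any_cons, List.any_nil,
    show ("A":String) = String.ofList ['A'] from rfl, show ("C":String) = String.ofList ['C'] from rfl,
    show ("G":String) = String.ofList ['G'] from rfl, show ("T":String) = String.ofList ['T'] from rfl]
  simp only [Bool.or_false, Bool.or_eq_false_iff, beq_eq_false_iff_ne, ne_eq, pvKeyEq]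
  exact ⟨fun h => h1 h.symm, fun h => h2 h.symm, fun h => h3 h.symm, fun h => h4 h.symm⟩

-- the positions each letter occurs at (what B's first pass collects for that letter)
def pvSel (ch : Char) (E : List (Int × Char)) : List Int :=
  (E.filter (fun p => p.2 = ch)).map (·.1)

lemma pvSel_append (ch : Char) (E F : List (Int × Char)) :
    pvSel ch (E ++ F) = pvSel ch E ++ pvSel ch F := by
  simp [pvSel]

-- B's first pass, evaluated on a literal 4-key state
lemma pvPhase1 (E : List (Int × Char)) (a c g t : List Int) :
    E.foldl (fun d (ic : Int × Char) =>
        if d.contains (String.ofList [ic.2]) then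
          d.modify (String.ofList [ic.2]) [] (fun l => l ++ [ic.1])
        else d)
      (PySem.Dict.mk [("A", a), ("C", c), ("G", g), ("T", t)])
    = PySem.Dict.mk [("A", a ++ pvSel 'A' E), ("C", c ++ pvSel 'C' E),
        ("G", g ++ pvSel 'G' E), ("T", t ++ pvSel 'T' E)] := by
  induction E generalizing a c g t with
  | nil => simp [pvSel]
  | cons p E ih =>
      rw [List.foldl_cons]
      by_cases hA : p.2 = 'A'
      · rw [show String.ofList [p.2] = "A" from by rw [hA]]
        rw [if_pos (by simp [PySem.Dict.contains_mk]), pvModA, ih]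
        simp [pvSel, hA]
      · by_cases hC : p.2 = 'C'
        · rw [show String.ofList [p.2] = "C" from by rw [hC]]
          rw [if_pos (by simp [PySem.Dict.contains_mk]), pvModC, ih]
          simp [pvSel, hC]
        · by_cases hG : p.2 = 'G'
          · rw [show String.ofList [p.2] = "G" from by rw [hG]]
            rw [if_pos (by simp [PySem.Dict.contains_mk]), pvModG, ih]
            simp [pvSel, hG]
          · by_cases hT : p.2 = 'T'
            · rw [show String.ofList [p.2] = "T" from by rw [hT]]
              rw [if_pos (by simp [PySem.Dict.contains_mk]), pvModT, ih]
              simp [pvSel, hT]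
            · rw [if_neg (by simp [pvContainsOther a c g t p.2 hA hC hG hT]), ih]
              simp [pvSel, hA, hC, hG, hT]

-- B's expansion step
def pvStepB (acc : List Int × Int × Int) (p : Int) : List Int × Int × Int :=
  (acc.1 ++ List.replicate (p - acc.2.2).toNat acc.2.1, acc.2.1 + 1, p)

-- invariant of B's per-letter run-length expansion: after folding the occurrence positions of l,
-- padding to l.length reproduces the running-count column, the counter is the count, prev ≤ length
lemma pvExpandInv (ch : Char) (l : List Char) :
    let r := (pvSel ch (PySem.List.enumerate l)).foldl pvStepB ([], 0, 0)
    r.1 ++ List.replicate ((l.length : Int) - r.2.2).toNat r.2.1 = pvScan ch 0 l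
      ∧ r.2.1 = (l.countP (· = ch) : Int) ∧ 0 ≤ r.2.2 ∧ r.2.2 ≤ (l.length : Int) := by
  induction l using List.reverseRecOn with
  | nil => simp [pvSel, pvScan, PySem.List.enumerate]
  | append_singleton m c ih =>
      obtain ⟨h1, h2, h3, h4⟩ := ih
      have hEnum : PySem.List.enumerate (m ++ [c]) =
          PySem.List.enumerate m ++ [((m.length : Int), c)] := by
        rw [PySem.List.enumerate_append]
        simp [PySem.List.enumerate_cons, PySem.List.enumerate_nil]
      by_cases hc : c = ch
      · have hsel : pvSel ch (PySem.List.enumerate (m ++ [c])) =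
            pvSel ch (PySem.List.enumerate m) ++ [(m.length : Int)] := by
          rw [hEnum, pvSel_append]; simp [pvSel, hc]
        rw [hsel, List.foldl_append]
        simp only [List.foldl_cons, List.foldl_nil]
        set r := (pvSel ch (PySem.List.enumerate m)).foldl pvStepB ([], 0, 0) with hr
        refine ⟨?_, ?_, by simp [pvStepB], by simp [pvStepB]⟩
        · have hrep : (((m ++ [c]).length : Int) - (pvStepB r (m.length : Int)).2.2).toNat = 1 := by
            simp [pvStepB]
          rw [hrep]
          have : pvScan ch 0 (m ++ [c]) = pvScan ch 0 m ++ [(m.countP (· = ch) : Int) + 1] := by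
            rw [pvScan_append]; simp [pvScan, pvInd, hc, add_comm]
          rw [this, ← h1]
          simp only [pvStepB, List.replicate_one, List.append_assoc, List.append_cancel_left_eq]
          rw [h2]
        · simp only [pvStepB, h2, List.countP_append, List.countP_cons]
          simp [hc]
      · have hsel : pvSel ch (PySem.List.enumerate (m ++ [c])) =
            pvSel ch (PySem.List.enumerate m) := by
          rw [hEnum, pvSel_append]; simp [pvSel, hc]
        rw [hsel]
        set r := (pvSel ch (PySem.List.enumerate m)).foldl pvStepB ([], 0, 0) with hr
        refine ⟨?_, ?_, h3, by simp; omega⟩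
        · have : pvScan ch 0 (m ++ [c]) = pvScan ch 0 m ++ [(m.countP (· = ch) : Int)] := by
            rw [pvScan_append]; simp [pvScan, pvInd, hc]
          rw [this, ← h1]
          have hrep : (((m ++ [c]).length : Int) - r.2.2).toNat
              = ((m.length : Int) - r.2.2).toNat + 1 := by simp; omega
          rw [hrep, List.replicate_succ']
          simp [h2]
        · simp only [h2, List.countP_append, List.countP_cons]
          simp [hc]

-- the run-length expansion of a letter's occurrence positions is its running-count column
lemma pvColEq (ch : Char) (l : List Char) :
    (let r := (pvSel ch (PySem.List.enumerate l)).foldl pvStepB ([], 0, 0)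
     r.1 ++ List.replicate ((l.length : Int) - r.2.2).toNat r.2.1) = pvScan ch 0 l :=
  (pvExpandInv ch l).1

-- B computes the four running-count columns
lemma pvAltEq (bwt : String) : get_tally_alt bwt = (pvState bwt.toList).items := by
  unfold get_tally_alt
  dsimp only
  rw [pvInit (fun _ => [])]
  rw [pvPhase1]
  simp only [List.nil_append]
  rw [show (fun (acc : List Int × Int × Int) (p : Int) =>
        (acc.1 ++ List.replicate (p - acc.2.2).toNat acc.2.1, acc.2.1 + 1, p)) = pvStepB from rfl]
  rw [pvInit]
  simp only [pvKeyA, pvKeyC, pvKeyG, pvKeyT, pvGetA, pvGetC, pvGetG, pvGetT]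
  have hs : PySem.Str.len bwt = (bwt.toList.length : Int) := by simp [PySem.Str.len]
  rw [hs]
  unfold pvState
  simp only [ALPHABET, List.map_cons, List.map_nil, pvKeyA, pvKeyC, pvKeyG, pvKeyT]
  rw [← pvColEq 'A' bwt.toList, ← pvColEq 'C' bwt.toList,
      ← pvColEq 'G' bwt.toList, ← pvColEq 'T' bwt.toList]

-- ===== VERDICT (by name: the statements are the Claim_ definitions above) =====
theorem get_tally_spec : Claim_equal_get_tally := by
  intro bwt _ hpre
  unfold Spec_get_tally
  obtain ⟨c0, rest, hlist⟩ : ∃ c0 rest, bwt.toList = c0 :: rest := by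
    cases h : bwt.toList with
    | nil => exact absurd (by simpa using congrArg String.ofList h) hpre
    | cons a t => exact ⟨a, t, rfl⟩
  -- B side
  have hB : get_tally_alt bwt = (pvState (c0 :: rest)).items := by
    rw [pvAltEq, hlist]
  -- A side
  have h0 : PySem.Str.pyGet? bwt 0 = some c0 := by
    simp [hlist]
  have hpg : ∀ i : Int, 1 ≤ i → i < (bwt.toList.length : Int) →
      PySem.Str.pyGet? bwt i = some (PySem.List.pyGetD bwt.toList i 'A') := by
    intro i h1 h2
    have h0i : (0 : Int) ≤ i := by omega
    simp only [PySem.Str.pyGet?, PySem.Chars.pyGet?_eq_listPyGet?]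
    rw [PySem.List.pyGetD_eq_getElem bwt.toList 'A' h0i h2,
        PySem.List.pyGet?_eq_some_getElem bwt.toList h0i h2]
  have hA : get_tally bwt = (pvState (c0 :: rest)).items := by
    unfold get_tally
    rw [pvInit (fun char => [if PySem.Str.pyGet? bwt 0 = some char then (1 : Int) else 0])]
    simp only [h0, Option.some.injEq]
    have hinit : PySem.Dict.mk
        [("A", [if c0 = 'A' then (1 : Int) else 0]), ("C", [if c0 = 'C' then (1 : Int) else 0]),
         ("G", [if c0 = 'G' then (1 : Int) else 0]), ("T", [if c0 = 'T' then (1 : Int) else 0])]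
        = pvState [c0] := by
      unfold pvState
      simp [ALPHABET, pvScan, pvInd]
    have hlen : PySem.Str.len bwt = (bwt.toList.length : Int) := by
      simp [PySem.Str.len]
    rw [hlen]
    have hcong : ∀ i ∈ PySem.List.pyRange 1 (bwt.toList.length : Int) 1,
        ∀ d : PySem.Dict String (List Int),
        (ALPHABET.foldl (fun d char =>
          let l := d.getD (String.ofList [char]) []
          if PySem.Str.pyGet? bwt i = some char then
            d.insert (String.ofList [char]) (l ++ [PySem.List.pyGetD l (-1) 0 + 1])
          else
            d.insert (String.ofList [char]) (l ++ [PySem.List.pyGetD l (-1) 0])) d)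
        = pvStep (PySem.List.pyGetD bwt.toList i 'A') d := by
      intro i hi d
      obtain ⟨hi1, hi2⟩ := (PySem.List.mem_pyRange_one).1 hi
      simp only [hpg i hi1 hi2, pvStep]
    rw [PySem.List.foldl_congr_mem' _ _ _ _ hcong]
    rw [PySem.List.foldl_pyRange_pyGetD' bwt.toList 'A' (fun d c => pvStep c d) _ (by norm_num)]
    rw [hinit]
    simp only [hlist, Int.toNat_one, List.drop_one, List.tail_cons]
    rw [pvLoopA c0 [] rest]
    simp
  rw [hA, hB]
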